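-- pv_equiv track=rewrite | github.com/TheoryInPractice/cricca | src/exp_runmemtests.py | get_final_clique_sets
-- ===== SOURCE A (Python) =====
-- def get_final_clique_sets(B, vertex_indices, k_input):
--     '''
--
--     '''
--     cliques = [[] for i in range(k_input)]
--
--     i=0
--     for row in B:
--         j=0
--         for c in row:
--             if c==1:
--                 cliques[j].append(vertex_indices[i])
--             j+=1
--         i+=1
--     return cliques
-- ===== SOURCE B (Python) =====
-- def get_final_clique_sets(B, vertex_indices, k_input):
--     # column-major gather: build each clique j independently by scanning the rows
--     return [[vertex_indices[i] for i, row in enumerate(B) if j < len(row) and row[j] == 1]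
--             for j in range(k_input)]
-- ===== Notes on version B (the rewrite author's own statement) =====
-- stated objective: simpler
-- what changed: Replaced the row-major scatter (one pass distributing entries into k mutable lists via counters i,j) by a column-major gather: one independent comprehension per column j collecting vertex_indices[i] over the rows.
import Mathlib
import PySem

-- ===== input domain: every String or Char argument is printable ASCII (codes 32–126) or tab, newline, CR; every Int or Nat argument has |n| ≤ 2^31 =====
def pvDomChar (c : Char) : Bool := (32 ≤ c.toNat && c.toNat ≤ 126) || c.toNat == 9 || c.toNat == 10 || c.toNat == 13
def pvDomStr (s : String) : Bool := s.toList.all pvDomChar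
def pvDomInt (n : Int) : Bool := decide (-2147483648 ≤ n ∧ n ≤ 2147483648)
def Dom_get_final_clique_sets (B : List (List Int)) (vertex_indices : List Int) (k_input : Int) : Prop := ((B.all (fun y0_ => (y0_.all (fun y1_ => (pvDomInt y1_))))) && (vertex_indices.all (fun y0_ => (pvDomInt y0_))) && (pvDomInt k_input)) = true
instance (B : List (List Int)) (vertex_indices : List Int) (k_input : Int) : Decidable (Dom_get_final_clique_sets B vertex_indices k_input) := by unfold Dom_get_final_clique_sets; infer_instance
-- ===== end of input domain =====

-- B replaces A's single-pass row-major scatter (counters i,j, appending into k mutable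
-- lists) by a column-major gather building each clique independently; objective: simpler.

-- ===== PORT A =====
def get_final_clique_sets (B : List (List Int)) (vertex_indices : List Int) (k_input : Int) : List (List Int) :=
  let cliques : List (List Int) := (PySem.List.pyRange 0 k_input 1).map (fun _ => ([] : List Int))
  let final := B.foldl (fun (st : List (List Int) × Int) row =>
    let inner := row.foldl (fun (t : List (List Int) × Int) c =>
      ((if c == 1 then
          PySem.List.pySetD t.1 t.2 (PySem.List.pyGetD t.1 t.2 [] ++ [PySem.List.pyGetD vertex_indices st.2 0])
        else t.1), t.2 + 1)) (st.1, (0 : Int))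
    (inner.1, st.2 + 1)) (cliques, (0 : Int))
  final.1

-- ===== PORT B =====
def get_final_clique_sets_alt (B : List (List Int)) (vertex_indices : List Int) (k_input : Int) : List (List Int) :=
  (PySem.List.pyRange 0 k_input 1).map (fun j =>
    (PySem.List.enumerate B 0).filterMap (fun p =>
      if decide (j < (p.2.length : Int)) && (PySem.List.pyGetD p.2 j 0 == 1) then
        some (PySem.List.pyGetD vertex_indices p.1 0)
      else none))

-- ===== PRECONDITION & SPEC =====
-- Pre_ is exactly where Python A returns: every entry equal to 1 must sit in a column
-- below k_input (else cliques[j] is an IndexError) and in a row whose index is below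
-- len(vertex_indices) (else vertex_indices[i] is an IndexError).
def Pre_get_final_clique_sets (B : List (List Int)) (vertex_indices : List Int) (k_input : Int) : Prop :=
  (B.zipIdx.all (fun ri => ri.1.zipIdx.all (fun cj =>
     !(cj.1 == 1) || (decide ((cj.2 : Int) < k_input) && decide (ri.2 < vertex_indices.length))))) = true
instance (B : List (List Int)) (vertex_indices : List Int) (k_input : Int) : Decidable (Pre_get_final_clique_sets B vertex_indices k_input) := by unfold Pre_get_final_clique_sets; infer_instance

def pvWitness_get_final_clique_sets : List (List Int) × List Int × Int := ([[1, 0], [0, 1]], [7, 8], 2)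

def Spec_get_final_clique_sets (B : List (List Int)) (vertex_indices : List Int) (k_input : Int) (out : List (List Int)) : Prop := out = get_final_clique_sets_alt B vertex_indices k_input
instance (B : List (List Int)) (vertex_indices : List Int) (k_input : Int) (out : List (List Int)) : Decidable (Spec_get_final_clique_sets B vertex_indices k_input out) := by unfold Spec_get_final_clique_sets; infer_instance

-- ===== CLAIM (what is proved, stated in full; the proofs are below) =====
def Claim_equal_get_final_clique_sets : Prop := ∀ (B : List (List Int)) (vertex_indices : List Int) (k_input : Int), Dom_get_final_clique_sets B vertex_indices k_input → Pre_get_final_clique_sets B vertex_indices k_input → Spec_get_final_clique_sets B vertex_indices k_input (get_final_clique_sets B vertex_indices k_input)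
-- ===== LEMMAS AND PROOFS =====

-- what one row contributes to clique jn when the inner counter starts at j
def colOne (row : List Int) (j : Nat) (jn : Nat) (x : Int) : List Int :=
  match row with
  | [] => []
  | c :: row => (if c = 1 ∧ jn = j then [x] else []) ++ colOne row (j + 1) jn x

-- what the rows contribute to clique jn, the row counter starting at i
def colAll (vi : List Int) (rows : List (List Int)) (i : Int) (jn : Nat) : List Int :=
  match rows with
  | [] => []
  | row :: rows => colOne row 0 jn (PySem.List.pyGetD vi i 0) ++ colAll vi rows (i + 1) jn

theorem inner_loop (x : Int) :
    ∀ (row : List Int) (cl : List (List Int)) (j : Nat) (jn : Nat),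
    (row.foldl (fun (t : List (List Int) × Int) c =>
        ((if c == 1 then
            PySem.List.pySetD t.1 t.2 (PySem.List.pyGetD t.1 t.2 [] ++ [x])
          else t.1), t.2 + 1)) (cl, (j : Int))).1[jn]?
      = cl[jn]?.map (fun l => l ++ colOne row j jn x) := by
  intro row
  induction row with
  | nil => intro cl j jn; simp [colOne]
  | cons c row ih =>
    intro cl j jn
    simp only [List.foldl_cons]
    have hcast : ((j : Int) + 1) = ((j + 1 : Nat) : Int) := by push_cast; ring
    by_cases hc : c = 1
    · simp only [hc, beq_self_eq_true, if_true, hcast]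
      rw [ih]
      rw [PySem.List.pySetD_natCast]
      by_cases hj : jn = j
      · subst hj
        by_cases hlt : jn < cl.length
        · rw [List.getElem?_set_self (by omega)]
          simp [PySem.List.pyGetD_natCast, List.getD_eq_getElem?_getD,
                List.getElem?_eq_getElem hlt, colOne, hc]
        · rw [List.getElem?_set]
          simp [List.getElem?_eq_none (by omega : cl.length ≤ jn), hlt]
      · rw [List.getElem?_set_ne (by omega)]
        simp [colOne, hc, hj]
    · have : (c == 1) = false := by simp [hc]
      simp only [this, if_false, hcast]
      rw [ih]
      simp [colOne, hc]

theorem outer_loop (vi : List Int) :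
    ∀ (rows : List (List Int)) (cl : List (List Int)) (i : Int) (jn : Nat),
    (rows.foldl (fun (st : List (List Int) × Int) row =>
        let inner := row.foldl (fun (t : List (List Int) × Int) c =>
          ((if c == 1 then
              PySem.List.pySetD t.1 t.2 (PySem.List.pyGetD t.1 t.2 [] ++ [PySem.List.pyGetD vi st.2 0])
            else t.1), t.2 + 1)) (st.1, (0 : Int))
        (inner.1, st.2 + 1)) (cl, i)).1[jn]?
      = cl[jn]?.map (fun l => l ++ colAll vi rows i jn) := by
  intro rows
  induction rows with
  | nil => intro cl i jn; simp [colAll]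
  | cons row rows ih =>
    intro cl i jn
    simp only [List.foldl_cons]
    rw [ih]
    have h0 : ((0 : Int)) = ((0 : Nat) : Int) := by norm_num
    rw [show ((cl, (0 : Int)) : List (List Int) × Int) = (cl, ((0 : Nat) : Int)) from by norm_num]
    rw [inner_loop (PySem.List.pyGetD vi i 0) row cl 0 jn]
    cases cl[jn]? with
    | none => simp
    | some l => simp [colAll]

theorem colOne_shift (x : Int) :
    ∀ (row : List Int) (j jn : Nat), j ≤ jn →
    colOne row j jn x = if row[jn - j]? = some 1 then [x] else [] := by
  intro row
  induction row with
  | nil => intro j jn h; simp [colOne]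
  | cons c row ih =>
    intro j jn h
    by_cases hj : jn = j
    · subst hj
      have hgt : ∀ (r : List Int) (m : Nat), jn < m → colOne r m jn x = [] := by
        intro r
        induction r with
        | nil => intro m hm; simp [colOne]
        | cons a r ihr =>
          intro m hm
          have hne : ¬ (a = 1 ∧ jn = m) := fun h => by omega
          simp [colOne, hne, ihr (m + 1) (by omega)]
      simp [colOne, hgt row (jn + 1) (by omega)]
    · have h1 : j + 1 ≤ jn := by omega
      have : jn - j = (jn - (j + 1)) + 1 := by omega
      simp only [colOne, (by omega : ¬ jn = j), and_false, if_false, List.nil_append,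
        ih (j + 1) jn h1, this, List.getElem?_cons_succ]

theorem colAll_filterMap (vi : List Int) :
    ∀ (rows : List (List Int)) (i : Int) (jn : Nat),
    colAll vi rows i jn
      = (PySem.List.enumerate rows i).filterMap (fun p =>
          if decide ((jn : Int) < (p.2.length : Int)) && (PySem.List.pyGetD p.2 (jn : Int) 0 == 1) then
            some (PySem.List.pyGetD vi p.1 0)
          else none) := by
  intro rows
  induction rows with
  | nil => intro i jn; simp [colAll, PySem.List.enumerate_nil]
  | cons row rows ih =>
    intro i jn
    rw [PySem.List.enumerate_cons, List.filterMap_cons]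
    have hcond : (decide ((jn : Int) < (row.length : Int)) && (PySem.List.pyGetD row (jn : Int) 0 == 1)) = true
        ↔ row[jn]? = some 1 := by
      by_cases hlt : jn < row.length
      · simp [PySem.List.pyGetD_natCast, List.getD_eq_getElem?_getD,
              List.getElem?_eq_getElem hlt, (by exact_mod_cast hlt : (jn : Int) < (row.length : Int))]
      · simp [List.getElem?_eq_none (by omega : row.length ≤ jn),
              (by exact_mod_cast hlt : ¬ (jn : Int) < (row.length : Int))]
    simp only [colAll]
    rw [colOne_shift _ row 0 jn (by omega), ih]
    simp only [Nat.sub_zero]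
    by_cases hb : (decide ((jn : Int) < (row.length : Int)) && (PySem.List.pyGetD row (jn : Int) 0 == 1)) = true
    · rw [if_pos hb, if_pos (hcond.mp hb)]; rfl
    · rw [if_neg hb, if_neg (fun h => hb (hcond.mpr h))]; rfl

theorem ports_agree (B : List (List Int)) (vertex_indices : List Int) (k_input : Int) :
    get_final_clique_sets B vertex_indices k_input = get_final_clique_sets_alt B vertex_indices k_input := by
  apply List.ext_getElem?
  intro jn
  unfold get_final_clique_sets get_final_clique_sets_alt
  simp only []
  rw [outer_loop]
  rw [List.getElem?_map, List.getElem?_map]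
  by_cases h : jn < (PySem.List.pyRange 0 k_input 1).length
  · rw [List.getElem?_eq_getElem h]
    have hval : (PySem.List.pyRange 0 k_input 1)[jn] = (jn : Int) := by
      rw [PySem.List.getElem_pyRange_one]; ring
    simp only [Option.map_some, hval, List.nil_append]
    rw [colAll_filterMap]
  · rw [List.getElem?_eq_none (by omega : (PySem.List.pyRange 0 k_input 1).length ≤ jn)]
    simp

-- ===== VERDICT (by name: the statement is the Claim_ definition above) =====
theorem get_final_clique_sets_spec : Claim_equal_get_final_clique_sets := by
  intro B vi k _ _
  unfold Spec_get_final_clique_sets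
  exact ports_agree B vi k
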